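-- pv_equiv track=rewrite | github.com/ChristopherFowler/polynomial-reconstruction | poly3d_cubic.py | generate_exponents_3d
-- ===== SOURCE A (Python) =====
-- def generate_exponents_3d(degree):
--     exps = []
--     for d in range(degree + 1):     # total degree
--         for i in range(d + 1):
--             for j in range(d - i + 1):
--                 k = d - i - j
--                 exps.append((i, j, k))
--     return exps
-- ===== SOURCE B (Python) =====
-- def generate_exponents_3d(degree):
--     # Bucket strategy: enumerate triples with each coordinate bounded directly
--     # (i-major order) and bucket them by total degree, then concatenate the
--     # buckets in increasing total degree.
--     buckets = {}
--     for i in range(degree + 1):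
--         for j in range(degree + 1 - i):
--             for k in range(degree + 1 - i - j):
--                 buckets.setdefault(i + j + k, []).append((i, j, k))
--     return [t for d in range(degree + 1) for t in buckets.get(d, [])]
-- ===== Notes on version B (the rewrite author's own statement) =====
-- stated objective: alternative
-- what changed: A generates the triples shell by shell (outer loop over the total degree d, computing k = d-i-j); B enumerates the triples with each coordinate bounded directly in i-major order, distributes them into buckets keyed by total degree, and concatenates the buckets in increasing total degree.
import Mathlib
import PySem

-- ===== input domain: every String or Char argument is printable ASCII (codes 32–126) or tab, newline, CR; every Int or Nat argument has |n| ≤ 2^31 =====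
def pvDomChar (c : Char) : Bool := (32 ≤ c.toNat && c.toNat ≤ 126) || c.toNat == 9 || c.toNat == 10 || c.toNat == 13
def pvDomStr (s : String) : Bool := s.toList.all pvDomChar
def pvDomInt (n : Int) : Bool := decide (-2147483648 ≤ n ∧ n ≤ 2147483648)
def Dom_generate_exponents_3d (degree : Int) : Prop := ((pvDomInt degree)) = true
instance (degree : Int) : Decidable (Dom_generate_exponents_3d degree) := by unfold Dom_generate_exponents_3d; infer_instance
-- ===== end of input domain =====

-- B enumerates the triples with each coordinate bounded directly (i-major order) and
-- buckets them by total degree, then concatenates the buckets — a different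
-- decomposition (distribution into buckets instead of shell-by-shell generation).

-- ===== PORT A =====
def generate_exponents_3d (degree : Int) : List (Int × Int × Int) :=
  (PySem.List.pyRange 0 (degree + 1) 1).foldl (fun exps d =>
    (PySem.List.pyRange 0 (d + 1) 1).foldl (fun exps i =>
      (PySem.List.pyRange 0 (d - i + 1) 1).foldl (fun exps j =>
        exps ++ [(i, j, d - i - j)]) exps) exps) []

-- ===== PORT B =====
-- `buckets.setdefault(d, []).append(t)` nets to `buckets[d] = buckets.get(d, []) + [t]`,
-- which is exactly PySem.Dict.modify with default [].
def generate_exponents_3d_alt (degree : Int) : List (Int × Int × Int) :=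
  let buckets : PySem.Dict Int (List (Int × Int × Int)) :=
    (PySem.List.pyRange 0 (degree + 1) 1).foldl (fun bs i =>
      (PySem.List.pyRange 0 (degree + 1 - i) 1).foldl (fun bs j =>
        (PySem.List.pyRange 0 (degree + 1 - i - j) 1).foldl (fun bs k =>
          PySem.Dict.modify bs (i + j + k) [] (fun b => b ++ [(i, j, k)])) bs) bs)
      PySem.Dict.empty
  (PySem.List.pyRange 0 (degree + 1) 1).flatMap (fun d => PySem.Dict.getD buckets d [])

-- ===== PRECONDITION & SPEC =====
def Spec_generate_exponents_3d (degree : Int) (out : List (Int × Int × Int)) : Prop := out = generate_exponents_3d_alt degree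
instance (degree : Int) (out : List (Int × Int × Int)) : Decidable (Spec_generate_exponents_3d degree out) := by unfold Spec_generate_exponents_3d; infer_instance

-- ===== CLAIM (what is proved, stated in full; the proofs are below) =====
def Claim_equal_generate_exponents_3d : Prop := ∀ (degree : Int), Dom_generate_exponents_3d degree → Spec_generate_exponents_3d degree (generate_exponents_3d degree)

-- ===== LEMMAS AND PROOFS =====

-- A's output, written as nested flatMaps (shells of fixed total degree d).
def pvRowA (d i : Int) : List (Int × Int × Int) :=
  (PySem.List.pyRange 0 (d - i + 1) 1).map (fun j => (i, j, d - i - j))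
def pvBlkA (d : Int) : List (Int × Int × Int) :=
  (PySem.List.pyRange 0 (d + 1) 1).flatMap (pvRowA d)
def pvAflat (degree : Int) : List (Int × Int × Int) :=
  (PySem.List.pyRange 0 (degree + 1) 1).flatMap pvBlkA

-- B's enumeration order (i-major) as flatMaps, B's bucket dictionary, and the
-- full lexicographic key both lists are strictly increasing under.
def pvRowB (n i j : Int) : List (Int × Int × Int) :=
  (PySem.List.pyRange 0 (n + 1 - i - j) 1).map (fun k => (i, j, k))
def pvColB (n i : Int) : List (Int × Int × Int) :=
  (PySem.List.pyRange 0 (n + 1 - i) 1).flatMap (pvRowB n i)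
def pvBraw (n : Int) : List (Int × Int × Int) :=
  (PySem.List.pyRange 0 (n + 1) 1).flatMap (pvColB n)
def pvBuckets (degree : Int) : PySem.Dict Int (List (Int × Int × Int)) :=
  (PySem.List.pyRange 0 (degree + 1) 1).foldl (fun bs i =>
    (PySem.List.pyRange 0 (degree + 1 - i) 1).foldl (fun bs j =>
      (PySem.List.pyRange 0 (degree + 1 - i - j) 1).foldl (fun bs k =>
        PySem.Dict.modify bs (i + j + k) [] (fun b => b ++ [(i, j, k)])) bs) bs)
    PySem.Dict.empty
def pvKeyId (t : Int × Int × Int) : Lex (Int × Lex (Int × Int)) :=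
  toLex (t.1, toLex (t.2.1, t.2.2))
def pvSum (t : Int × Int × Int) : Int := t.1 + t.2.1 + t.2.2

theorem pvA_eq_flat (degree : Int) : generate_exponents_3d degree = pvAflat degree := by
  unfold generate_exponents_3d pvAflat pvBlkA pvRowA
  simp only [PySem.List.foldl_append_singleton_eq_map, PySem.List.foldl_append_eq_flatMap,
    List.nil_append]

theorem pvB_eq_flat (degree : Int) :
    generate_exponents_3d_alt degree =
      (PySem.List.pyRange 0 (degree + 1) 1).flatMap (fun d => PySem.Dict.getD (pvBuckets degree) d []) := rfl

theorem pvKeyId_lt_iff (a b : Int × Int × Int) :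
    pvKeyId a < pvKeyId b ↔ a.1 < b.1 ∨ (a.1 = b.1 ∧ (a.2.1 < b.2.1 ∨ (a.2.1 = b.2.1 ∧ a.2.2 < b.2.2))) := by
  simp [pvKeyId, Prod.Lex.toLex_lt_toLex]

theorem pvKeyId_injective : Function.Injective pvKeyId := by
  rintro ⟨a1, a2, a3⟩ ⟨b1, b2, b3⟩ h
  simp only [pvKeyId, toLex_inj, Prod.mk.injEq] at h
  simp_all

theorem pv_mem_rowA (d i : Int) (x : Int × Int × Int) :
    x ∈ pvRowA d i ↔ x.1 = i ∧ 0 ≤ x.2.1 ∧ x.2.1 < d - i + 1 ∧ x.2.2 = d - i - x.2.1 := by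
  obtain ⟨a, b, c⟩ := x
  simp only [pvRowA, List.mem_map, PySem.List.mem_pyRange_one, Prod.mk.injEq]
  constructor
  · rintro ⟨j, ⟨h0, h1⟩, rfl, rfl, rfl⟩; simp_all
  · rintro ⟨rfl, h0, h1, rfl⟩; exact ⟨b, ⟨h0, h1⟩, rfl, rfl, rfl⟩

theorem pv_mem_blkA (d : Int) (x : Int × Int × Int) :
    x ∈ pvBlkA d ↔ 0 ≤ x.1 ∧ 0 ≤ x.2.1 ∧ x.1 + x.2.1 ≤ d ∧ x.2.2 = d - x.1 - x.2.1 := by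
  simp only [pvBlkA, List.mem_flatMap, PySem.List.mem_pyRange_one, pv_mem_rowA]
  constructor
  · rintro ⟨i, ⟨h0, h1⟩, h2, h3, h4, h5⟩; omega
  · rintro ⟨h0, h1, h2, h3⟩; exact ⟨x.1, by omega, rfl, by omega, by omega, by omega⟩

theorem pv_mem_rowB (n i j : Int) (x : Int × Int × Int) :
    x ∈ pvRowB n i j ↔ x.1 = i ∧ x.2.1 = j ∧ 0 ≤ x.2.2 ∧ x.2.2 < n + 1 - i - j := by
  obtain ⟨a, b, c⟩ := x
  simp only [pvRowB, List.mem_map, PySem.List.mem_pyRange_one, Prod.mk.injEq]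
  constructor
  · rintro ⟨k, ⟨h0, h1⟩, rfl, rfl, rfl⟩; simp_all
  · rintro ⟨rfl, rfl, h0, h1⟩; exact ⟨c, ⟨h0, h1⟩, rfl, rfl, rfl⟩

theorem pv_mem_colB (n i : Int) (x : Int × Int × Int) :
    x ∈ pvColB n i ↔ x.1 = i ∧ 0 ≤ x.2.1 ∧ x.2.1 < n + 1 - i ∧ 0 ≤ x.2.2 ∧ x.2.2 < n + 1 - i - x.2.1 := by
  simp only [pvColB, List.mem_flatMap, PySem.List.mem_pyRange_one, pv_mem_rowB]
  constructor
  · rintro ⟨j, ⟨h0, h1⟩, h2, h3, h4, h5⟩; omega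
  · rintro ⟨rfl, h0, h1, h2, h3⟩; exact ⟨x.2.1, by omega, rfl, rfl, by omega, by omega⟩

theorem pv_mem_Braw (n : Int) (x : Int × Int × Int) :
    x ∈ pvBraw n ↔ 0 ≤ x.1 ∧ 0 ≤ x.2.1 ∧ 0 ≤ x.2.2 ∧ x.1 + x.2.1 + x.2.2 ≤ n := by
  simp only [pvBraw, List.mem_flatMap, PySem.List.mem_pyRange_one, pv_mem_colB]
  constructor
  · rintro ⟨i, ⟨h0, h1⟩, h2, h3, h4, h5, h6⟩; omega
  · rintro ⟨h0, h1, h2, h3⟩; exact ⟨x.1, by omega, rfl, by omega, by omega, by omega, by omega⟩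

theorem pv_pairwise_blkA (d : Int) :
    (pvBlkA d).Pairwise (fun a b => pvKeyId a < pvKeyId b) := by
  unfold pvBlkA
  rw [List.pairwise_flatMap]
  constructor
  · intro i _
    unfold pvRowA
    rw [List.pairwise_map]
    exact (PySem.List.pairwise_lt_pyRange_one _ _).imp (fun h => by
      simp [pvKeyId_lt_iff]; omega)
  · refine (PySem.List.pairwise_lt_pyRange_one _ _).imp ?_
    intro i i' h x hx y hy
    rw [pv_mem_rowA] at hx hy
    rw [pvKeyId_lt_iff]; omega

theorem pv_pairwise_Braw (n : Int) :
    (pvBraw n).Pairwise (fun a b => pvKeyId a < pvKeyId b) := by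
  unfold pvBraw
  rw [List.pairwise_flatMap]
  constructor
  · intro i _
    unfold pvColB
    rw [List.pairwise_flatMap]
    constructor
    · intro j _
      unfold pvRowB
      rw [List.pairwise_map]
      exact (PySem.List.pairwise_lt_pyRange_one _ _).imp (fun h => by
        simp [pvKeyId_lt_iff]; omega)
    · refine (PySem.List.pairwise_lt_pyRange_one _ _).imp ?_
      intro j j' h x hx y hy
      rw [pv_mem_rowB] at hx hy
      rw [pvKeyId_lt_iff]; omega
  · refine (PySem.List.pairwise_lt_pyRange_one _ _).imp ?_
    intro i i' h x hx y hy
    rw [pv_mem_colB] at hx hy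
    rw [pvKeyId_lt_iff]; omega

theorem pv_nodup_of_pairwise_key {κ : Type} [Preorder κ] (key : (Int × Int × Int) → κ)
    (l : List (Int × Int × Int)) (h : l.Pairwise (fun a b => key a < key b)) : l.Nodup :=
  h.imp (fun {a b} hab => by rintro rfl; exact lt_irrefl _ hab)

-- The bucket loop, flattened: a fold of `modify (pvSum t) [] (· ++ [t])` over B's raw enumeration.
theorem pv_buckets_eq_foldl (degree : Int) :
    pvBuckets degree =
      (pvBraw degree).foldl (fun bs t => bs.modify (pvSum t) [] (fun b => b ++ [t])) PySem.Dict.empty := by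
  unfold pvBuckets pvBraw pvColB pvRowB pvSum
  simp only [List.foldl_flatMap, List.foldl_map]

theorem pv_foldl_modify_key {T : Type} (l : List T) (key : T → Int)
    (d : PySem.Dict Int (List T)) :
    l.foldl (fun bs t => bs.modify (key t) [] (fun b => b ++ [t])) d =
      (l.map (fun t => (key t, t))).foldl (fun bs p => bs.modify p.1 [] (fun b => b ++ [p.2])) d := by
  rw [List.foldl_map]

theorem pv_buckets_getD (degree c : Int) :
    PySem.Dict.getD (pvBuckets degree) c [] =
      (pvBraw degree).filter (fun t => pvSum t == c) := by
  rw [pv_buckets_eq_foldl, pv_foldl_modify_key, PySem.Dict.getD_foldl_modify_append,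
    List.filter_map]
  simp [List.map_map, Function.comp_def]

theorem pv_filter_eq_blkA (degree d : Int) (_h0 : 0 ≤ d) (h1 : d < degree + 1) :
    (pvBraw degree).filter (fun t => pvSum t == d) = pvBlkA d := by
  refine PySem.List.eq_of_perm_of_pairwise_le_of_injective pvKeyId pvKeyId_injective ?_
    (((pv_pairwise_Braw degree).filter _).imp (fun h => le_of_lt h))
    ((pv_pairwise_blkA d).imp (fun h => le_of_lt h))
  refine (List.perm_ext_iff_of_nodup
    (pv_nodup_of_pairwise_key pvKeyId _ ((pv_pairwise_Braw degree).filter _))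
    (pv_nodup_of_pairwise_key pvKeyId _ (pv_pairwise_blkA d))).mpr ?_
  intro a
  simp only [List.mem_filter, pv_mem_Braw, pv_mem_blkA, pvSum, beq_iff_eq]
  omega

-- ===== VERDICT (by name: the statement is the Claim_ definition above) =====
theorem generate_exponents_3d_spec : Claim_equal_generate_exponents_3d := by
  intro degree _
  unfold Spec_generate_exponents_3d
  rw [pvA_eq_flat, pvB_eq_flat, pvAflat]
  refine (List.flatMap_congr ?_).symm
  intro d hd
  rw [PySem.List.mem_pyRange_one] at hd
  rw [pv_buckets_getD, pv_filter_eq_blkA degree d hd.1 hd.2]
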